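-- pv_equiv track=rewrite | github.com/collective/collective.jbot | collective/jbot/views.py | mangleAbsoluteFilename
-- ===== SOURCE A (Python) =====
-- def mangleAbsoluteFilename(filename):
--     parts = filename.split('/')
--     pivot = 0
--     for idx, part in enumerate(reversed(parts[:-2])):
--         if '.' in part:
--             pivot = idx
--             break
--     return '.'.join(parts[len(parts) - pivot - 2:])
-- ===== SOURCE B (Python) =====
-- def mangleAbsoluteFilename(filename):
--     parts = filename.split('/')
--     start = len(parts) - 2
--     for idx, part in enumerate(parts[:-2]):
--         if '.' in part:
--             start = idx + 1
--     return '.'.join(parts[start:])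
-- ===== Notes on version B (the rewrite author's own statement) =====
-- stated objective: simpler
-- what changed: Replaces the reversed scan with break and the len-pivot-2 index arithmetic by a single forward pass that records start = idx + 1 at the last dotted component (default len(parts) - 2) and joins parts[start:].
import Mathlib
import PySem

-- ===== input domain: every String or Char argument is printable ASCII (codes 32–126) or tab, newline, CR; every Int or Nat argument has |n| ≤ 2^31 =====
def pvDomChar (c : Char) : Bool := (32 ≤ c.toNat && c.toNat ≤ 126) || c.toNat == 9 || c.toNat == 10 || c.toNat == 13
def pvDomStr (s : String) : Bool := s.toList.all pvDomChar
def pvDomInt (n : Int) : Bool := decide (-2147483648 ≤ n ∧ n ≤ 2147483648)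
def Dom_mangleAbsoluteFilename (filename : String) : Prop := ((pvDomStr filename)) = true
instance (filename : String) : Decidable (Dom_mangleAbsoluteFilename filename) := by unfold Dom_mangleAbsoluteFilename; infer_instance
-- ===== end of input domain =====

-- B replaces A's reversed scan with break and its len-pivot-2 arithmetic by one forward pass
-- keeping the last dotted index; objective: simpler. Equivalence proved on all inputs (A is total).

-- ===== PORT A =====
-- the loop "for idx, part in enumerate(reversed(parts[:-2])): if '.' in part: pivot = idx; break"
def pvPivotLoop : List String → Int → Int
  | [], _ => 0
  | p :: rest, idx => if PySem.Str.isIn "." p then idx else pvPivotLoop rest (idx + 1)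

def mangleAbsoluteFilename (filename : String) : String :=
  let parts := (PySem.Str.split? filename "/").getD []   -- sep "/" ≠ "", so split? is always some
  let pivot := pvPivotLoop (PySem.List.slice parts none (some (-2))).reverse 0
  PySem.Str.join "." (PySem.List.slice parts (some ((parts.length : Int) - pivot - 2)) none)

-- ===== PORT B =====
def mangleAbsoluteFilename_alt (filename : String) : String :=
  let parts := (PySem.Str.split? filename "/").getD []   -- sep "/" ≠ "", so split? is always some
  let start := (PySem.List.enumerate (PySem.List.slice parts none (some (-2)))).foldl
      (fun s ip => if PySem.Str.isIn "." ip.2 then ip.1 + 1 else s) ((parts.length : Int) - 2)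
  PySem.Str.join "." (PySem.List.slice parts (some start) none)

-- ===== PRECONDITION & SPEC =====
def Spec_mangleAbsoluteFilename (filename : String) (out : String) : Prop := out = mangleAbsoluteFilename_alt filename
instance (filename : String) (out : String) : Decidable (Spec_mangleAbsoluteFilename filename out) := by unfold Spec_mangleAbsoluteFilename; infer_instance

-- ===== CLAIM (what is proved, stated in full; the proofs are below) =====
def Claim_equal_mangleAbsoluteFilename : Prop := ∀ (filename : String), Dom_mangleAbsoluteFilename filename → Spec_mangleAbsoluteFilename filename (mangleAbsoluteFilename filename)

-- ===== LEMMAS AND PROOFS =====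

-- A's loop over a list with no dotted part returns the default 0
theorem pvPivotLoop_of_not_any (L : List String) (k : Int)
    (h : L.any (fun p => PySem.Str.isIn "." p) = false) : pvPivotLoop L k = 0 := by
  induction L generalizing k with
  | nil => rfl
  | cons p rest ih =>
    simp only [List.any_cons, Bool.or_eq_false_iff] at h
    simp only [pvPivotLoop, h.1]
    simpa using ih (k + 1) h.2

-- with a hit present, A's loop shifts with its accumulator
theorem pvPivotLoop_shift (L : List String)
    (h : L.any (fun p => PySem.Str.isIn "." p) = true) (k : Int) :
    pvPivotLoop L (k + 1) = pvPivotLoop L k + 1 := by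
  induction L generalizing k with
  | nil => simp at h
  | cons p rest ih =>
    by_cases hp : PySem.Str.isIn "." p = true
    · simp only [pvPivotLoop]; rw [if_pos hp, if_pos hp]
    · have hpf : PySem.Str.isIn "." p = false := by
        simpa using hp
      rw [List.any_cons, hpf, Bool.false_or] at h
      simp only [pvPivotLoop]
      rw [if_neg hp, if_neg hp]
      exact ih h (k + 1)

theorem pvEnumerate_append_singleton (L : List String) (x : String) (s : Int) :
    PySem.List.enumerate (L ++ [x]) s = PySem.List.enumerate L s ++ [(s + L.length, x)] := by
  induction L generalizing s with
  | nil => simp [PySem.List.enumerate_cons, PySem.List.enumerate_nil]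
  | cons y ys ih =>
    simp only [List.cons_append, PySem.List.enumerate_cons, ih, List.length_cons]
    push_cast
    ring_nf

-- B's fold computes (length - A's pivot) when some part is dotted, its default b otherwise
theorem pvFold_eq (L : List String) (b : Int) :
    (PySem.List.enumerate L).foldl
        (fun s ip => if PySem.Str.isIn "." ip.2 then ip.1 + 1 else s) b
      = if L.any (fun p => PySem.Str.isIn "." p) = true then
          (L.length : Int) - pvPivotLoop L.reverse 0
        else b := by
  induction L using List.reverseRecOn generalizing b with
  | nil => simp [PySem.List.enumerate_nil]
  | append_singleton L x ih =>
    rw [pvEnumerate_append_singleton, List.foldl_append]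
    simp only [List.foldl_cons, List.foldl_nil]
    rw [ih, List.any_append, List.any_cons, List.any_nil, List.reverse_append,
      List.reverse_singleton, List.singleton_append, List.length_append, List.length_singleton]
    simp only [pvPivotLoop, Bool.or_false]
    by_cases hx : PySem.Str.isIn "." x = true
    · rw [if_pos hx, if_pos hx, hx, Bool.or_true, if_pos rfl]
      push_cast; omega
    · have hxf : PySem.Str.isIn "." x = false := by simpa using hx
      rw [if_neg hx, if_neg hx, hxf, Bool.or_false]
      by_cases hL : L.any (fun p => PySem.Str.isIn "." p) = true
      · rw [if_pos hL, if_pos hL]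
        have hrev : L.reverse.any (fun p => PySem.Str.isIn "." p) = true := by
          rwa [List.any_reverse]
        have hs := pvPivotLoop_shift L.reverse hrev 0
        rw [hs]
        push_cast; omega
      · rw [if_neg hL, if_neg hL]

-- the start index A computes equals the one B computes
theorem pvStart_eq (parts : List String) :
    (parts.length : Int) - pvPivotLoop (PySem.List.slice parts none (some (-2))).reverse 0 - 2
      = (PySem.List.enumerate (PySem.List.slice parts none (some (-2)))).foldl
          (fun s ip => if PySem.Str.isIn "." ip.2 then ip.1 + 1 else s) ((parts.length : Int) - 2) := by
  rw [pvFold_eq]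
  have hlen : (PySem.List.slice parts none (some (-2))).length = parts.length - 2 := by
    rw [PySem.List.slice_to_neg_ofNat parts 2 (by omega), List.length_take]
    omega
  by_cases hL : (PySem.List.slice parts none (some (-2))).any (fun p => PySem.Str.isIn "." p) = true
  · rw [if_pos hL]
    have hne : 0 < (PySem.List.slice parts none (some (-2))).length := by
      rcases List.any_eq_true.mp hL with ⟨q, hq, _⟩
      exact List.length_pos_of_mem hq
    omega
  · rw [if_neg hL]
    have hLf : (PySem.List.slice parts none (some (-2))).any (fun p => PySem.Str.isIn "." p) = false := by
      simpa using hL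
    rw [pvPivotLoop_of_not_any _ _ (by rwa [List.any_reverse])]
    omega

-- ===== VERDICT (by name: the statement is the Claim_ definition above) =====
theorem mangleAbsoluteFilename_spec : Claim_equal_mangleAbsoluteFilename := by
  intro filename _
  unfold Spec_mangleAbsoluteFilename
  simp only [mangleAbsoluteFilename, mangleAbsoluteFilename_alt]
  rw [pvStart_eq]
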